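-- pv_equiv track=rewrite | github.com/ViktorWase/StartingGuessRootFinder | optimization.py | get_gene_max_values
-- ===== SOURCE A (Python) =====
-- def get_gene_max_values(dims, nr_of_parameters, len_of_op_table, nr_of_nodes, nodes_per_layer=1):
-- 	"""
-- 	A gene is a list of n ints, that define the CGP. Each such number has
-- 	a minimum value, and a maximum value. The minimum value is always zero.
-- 	This function will return a list of the n maximum values.
-- 	"""
-- 	# Check the inputdata
-- 	assert nodes_per_layer >= 1
-- 	assert nr_of_nodes > 0
-- 	assert dims > 0
-- 	assert nr_of_parameters >= 0
--
-- 	# The number of nodes has to be divisible by nodes_per_layer.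
-- 	# Otherwise the number of layers won't be an int, and that is strange.
-- 	assert nr_of_nodes % nodes_per_layer == 0
--
-- 	dim_and_pars = dims + nr_of_parameters
--
-- 	# Each node has 3 ints: the two inputs and the operation.
-- 	len_of_gene = nr_of_nodes*3 + 1
-- 	max_vals = [-1]*len_of_gene
--
-- 	layer = 0
-- 	for node_count in range(nr_of_nodes):
-- 		nr_of_nodes_and_inputs_of_all_prev_layers = layer*nodes_per_layer + dim_and_pars
--
-- 		max_vals[3*node_count+2] = nr_of_nodes_and_inputs_of_all_prev_layers - 1
-- 		max_vals[3*node_count+1] = nr_of_nodes_and_inputs_of_all_prev_layers - 1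
-- 		max_vals[3*node_count] = len_of_op_table-1
--
-- 		if node_count%nodes_per_layer == nodes_per_layer-1:
-- 			layer += 1
--
-- 	# The last int of the gene just points to one of the inputs, parameters or nodes and
-- 	# calls it the outout.
-- 	max_vals[-1] = dim_and_pars + nr_of_nodes - 1
-- 	assert min(max_vals)>=0
-- 	return max_vals
-- ===== SOURCE B (Python) =====
-- def get_gene_max_values(dims, nr_of_parameters, len_of_op_table, nr_of_nodes, nodes_per_layer=1):
-- 	assert nodes_per_layer >= 1
-- 	assert nr_of_nodes > 0
-- 	assert dims > 0
-- 	assert nr_of_parameters >= 0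
-- 	assert nr_of_nodes % nodes_per_layer == 0
--
-- 	dim_and_pars = dims + nr_of_parameters
--
-- 	# All nodes in one layer share the same maximum values, so iterate over LAYERS
-- 	# (not nodes): emit the whole layer's block at once by list replication.
-- 	nr_of_layers = nr_of_nodes // nodes_per_layer
-- 	max_vals = []
-- 	for layer in range(nr_of_layers):
-- 		v = layer * nodes_per_layer + dim_and_pars - 1
-- 		max_vals += [len_of_op_table - 1, v, v] * nodes_per_layer
-- 	max_vals.append(dim_and_pars + nr_of_nodes - 1)
-- 	assert min(max_vals) >= 0
-- 	return max_vals
-- ===== Notes on version B (the rewrite author's own statement) =====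
-- stated objective: alternative
-- what changed: Iterates over LAYERS instead of nodes: since every node of a layer has identical max values, B emits each layer's whole block at once by list replication ([op,v,v]*nodes_per_layer), eliminating A's per-node loop, its preallocated list mutated in place and its branch-updated layer counter.
import Mathlib
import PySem

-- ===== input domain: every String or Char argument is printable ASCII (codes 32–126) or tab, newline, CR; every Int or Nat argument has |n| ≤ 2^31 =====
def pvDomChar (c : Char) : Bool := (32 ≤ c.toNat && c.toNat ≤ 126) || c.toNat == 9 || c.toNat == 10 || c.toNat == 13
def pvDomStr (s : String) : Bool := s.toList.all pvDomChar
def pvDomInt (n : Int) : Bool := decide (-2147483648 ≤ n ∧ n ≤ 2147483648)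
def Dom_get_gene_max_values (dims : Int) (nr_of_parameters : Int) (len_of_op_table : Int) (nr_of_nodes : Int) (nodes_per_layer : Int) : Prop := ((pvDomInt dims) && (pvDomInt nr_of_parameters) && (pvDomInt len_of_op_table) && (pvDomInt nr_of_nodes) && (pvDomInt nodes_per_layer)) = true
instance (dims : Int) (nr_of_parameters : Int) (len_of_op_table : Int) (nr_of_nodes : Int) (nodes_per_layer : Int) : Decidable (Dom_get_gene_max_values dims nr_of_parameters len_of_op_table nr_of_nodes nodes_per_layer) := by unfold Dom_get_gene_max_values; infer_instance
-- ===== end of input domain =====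

-- B iterates over LAYERS instead of nodes, emitting each layer's whole block at once by
-- list replication, eliminating A's per-node loop, mutated list and layer counter (objective: alternative).


-- ===== PORT A =====
-- literal transliteration: preallocated [-1]*len list, foldl over range(nr_of_nodes)
-- carrying (max_vals, layer), final write at index -1
def get_gene_max_values (dims : Int) (nr_of_parameters : Int) (len_of_op_table : Int) (nr_of_nodes : Int) (nodes_per_layer : Int) : List Int :=
  let dim_and_pars := dims + nr_of_parameters
  let len_of_gene := nr_of_nodes * 3 + 1
  let max_vals : List Int := PySem.List.pyRepeat [-1] len_of_gene
  let st := (PySem.List.pyRange 0 nr_of_nodes 1).foldl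
    (fun (st : List Int × Int) node_count =>
      let mv := st.1
      let layer := st.2
      let prev := layer * nodes_per_layer + dim_and_pars
      let mv := PySem.List.pySetD mv (3 * node_count + 2) (prev - 1)
      let mv := PySem.List.pySetD mv (3 * node_count + 1) (prev - 1)
      let mv := PySem.List.pySetD mv (3 * node_count) (len_of_op_table - 1)
      let layer := if PySem.Int.mod node_count nodes_per_layer = nodes_per_layer - 1 then layer + 1 else layer
      (mv, layer))
    (max_vals, 0)
  PySem.List.pySetD st.1 (-1) (dim_and_pars + nr_of_nodes - 1)

-- ===== PORT B =====
-- literal transliteration of Source B: loop over layers, appending the replicated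
-- per-layer block '[op, v, v] * nodes_per_layer' each iteration, then append the output gene
def get_gene_max_values_alt (dims : Int) (nr_of_parameters : Int) (len_of_op_table : Int) (nr_of_nodes : Int) (nodes_per_layer : Int) : List Int :=
  let dim_and_pars := dims + nr_of_parameters
  let nr_of_layers := PySem.Int.floordiv nr_of_nodes nodes_per_layer
  let max_vals := (PySem.List.pyRange 0 nr_of_layers 1).foldl
    (fun (acc : List Int) layer =>
      let v := layer * nodes_per_layer + dim_and_pars - 1
      acc ++ PySem.List.pyRepeat [len_of_op_table - 1, v, v] nodes_per_layer)
    []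
  max_vals ++ [dim_and_pars + nr_of_nodes - 1]

-- ===== PRECONDITION & SPEC =====
-- Pre_ = exactly the inputs on which A's asserts all pass (A raises AssertionError otherwise):
-- the four sign conditions, divisibility of nr_of_nodes by nodes_per_layer, and
-- len_of_op_table ≥ 1 (needed for the final 'min(max_vals) >= 0' assert).
def Pre_get_gene_max_values (dims : Int) (nr_of_parameters : Int) (len_of_op_table : Int) (nr_of_nodes : Int) (nodes_per_layer : Int) : Prop :=
  1 ≤ nodes_per_layer ∧ 0 < nr_of_nodes ∧ 0 < dims ∧ 0 ≤ nr_of_parameters ∧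
  nr_of_nodes % nodes_per_layer = 0 ∧ 1 ≤ len_of_op_table
instance (dims : Int) (nr_of_parameters : Int) (len_of_op_table : Int) (nr_of_nodes : Int) (nodes_per_layer : Int) : Decidable (Pre_get_gene_max_values dims nr_of_parameters len_of_op_table nr_of_nodes nodes_per_layer) := by unfold Pre_get_gene_max_values; infer_instance

def pvWitness_get_gene_max_values : Int × Int × Int × Int × Int := (2, 1, 5, 4, 2)

def Spec_get_gene_max_values (dims : Int) (nr_of_parameters : Int) (len_of_op_table : Int) (nr_of_nodes : Int) (nodes_per_layer : Int) (out : List Int) : Prop := out = get_gene_max_values_alt dims nr_of_parameters len_of_op_table nr_of_nodes nodes_per_layer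
instance (dims : Int) (nr_of_parameters : Int) (len_of_op_table : Int) (nr_of_nodes : Int) (nodes_per_layer : Int) (out : List Int) : Decidable (Spec_get_gene_max_values dims nr_of_parameters len_of_op_table nr_of_nodes nodes_per_layer out) := by unfold Spec_get_gene_max_values; infer_instance

-- ===== CLAIM (what is proved, stated in full; the proofs are below) =====
def Claim_equal_get_gene_max_values : Prop := ∀ (dims : Int) (nr_of_parameters : Int) (len_of_op_table : Int) (nr_of_nodes : Int) (nodes_per_layer : Int), Dom_get_gene_max_values dims nr_of_parameters len_of_op_table nr_of_nodes nodes_per_layer → Pre_get_gene_max_values dims nr_of_parameters len_of_op_table nr_of_nodes nodes_per_layer → Spec_get_gene_max_values dims nr_of_parameters len_of_op_table nr_of_nodes nodes_per_layer (get_gene_max_values dims nr_of_parameters len_of_op_table nr_of_nodes nodes_per_layer)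

-- ===== LEMMAS AND PROOFS =====

-- incrementing the numerator steps the floor quotient exactly when a % b = b - 1
theorem ediv_succ_step (a b : Int) (hb : 0 < b) :
    (a + 1) / b = (if a % b = b - 1 then a / b + 1 else a / b) := by
  have h := Int.mul_ediv_add_emod a b
  have h0 : 0 ≤ a % b := Int.emod_nonneg a (by omega)
  have h1 : a % b < b := Int.emod_lt_of_pos a hb
  split_ifs with hr
  · have e2 : (a / b + 1) * b = b * (a / b) + b := by ring
    have e : a + 1 = (a / b + 1) * b := by rw [e2]; linarith
    rw [e, Int.mul_ediv_cancel _ (by omega)]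
  · have : ((a + 1) / b = a / b ∧ (a + 1) % b = a % b + 1) :=
      (Int.ediv_emod_unique hb).2 ⟨by linarith, by omega, by omega⟩
    exact this.1

theorem pySetD_neg_one_append_singleton (xs : List Int) (x v : Int) :
    PySem.List.pySetD (xs ++ [x]) (-1) v = xs ++ [v] := by
  simp [PySem.List.pySetD, PySem.List.pySet?, PySem.List.pyIdx?]

-- A's loop invariant: after k iterations the list is the per-node flattened prefix
-- followed by the untouched tail of -1s, and the layer counter is k // nodes_per_layer
theorem loop_invariant (dp lot npl : Int) (hnpl : 0 < npl) (N : Nat) (k : Nat) (hk : k ≤ N) :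
    (PySem.List.pyRange 0 (k : Int) 1).foldl
      (fun (st : List Int × Int) node_count =>
        let mv := st.1
        let layer := st.2
        let prev := layer * npl + dp
        let mv := PySem.List.pySetD mv (3 * node_count + 2) (prev - 1)
        let mv := PySem.List.pySetD mv (3 * node_count + 1) (prev - 1)
        let mv := PySem.List.pySetD mv (3 * node_count) (lot - 1)
        let layer := if PySem.Int.mod node_count npl = npl - 1 then layer + 1 else layer
        (mv, layer))
      (List.replicate (3 * N + 1) (-1), 0)
    = ((PySem.List.pyRange 0 (k : Int) 1).flatMap
        (fun n =>
          [lot - 1,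
           (PySem.Int.floordiv n npl) * npl + dp - 1,
           (PySem.Int.floordiv n npl) * npl + dp - 1])
        ++ List.replicate (3 * (N - k) + 1) (-1),
       PySem.Int.floordiv (k : Int) npl) := by
  induction k with
  | zero =>
      simp [PySem.Int.floordiv_eq_ediv_of_pos hnpl]
  | succ k ih =>
      have hk' : k ≤ N := Nat.le_of_succ_le hk
      have hcast : ((k + 1 : Nat) : Int) = (k : Int) + 1 := by push_cast; ring
      rw [hcast, PySem.List.pyRange_one_succ_right (by positivity),
          List.foldl_append, List.flatMap_append, ih hk']
      simp only [List.foldl_cons, List.foldl_nil, List.flatMap_cons, List.flatMap_nil]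
      set pre := (PySem.List.pyRange 0 (k : Int) 1).flatMap
          (fun n =>
            [lot - 1,
             (PySem.Int.floordiv n npl) * npl + dp - 1,
             (PySem.Int.floordiv n npl) * npl + dp - 1]) with hpre
      have hlen : pre.length = 3 * k := by
        rw [hpre, List.length_flatMap]
        simp [PySem.List.pyRange_one (0 : Int) (k : Int), List.map_map, Function.comp_def,
          Nat.mul_comm]
      have hrep : List.replicate (3 * (N - k) + 1) (-1 : Int) =
          (-1) :: (-1) :: (-1) :: List.replicate (3 * (N - (k + 1)) + 1) (-1) := by
        have h31 : 3 * (N - k) + 1 = (3 * (N - (k + 1)) + 1) + 3 := by omega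
        rw [h31]; rfl
      have hset : ∀ (i v : Int), 0 ≤ i → ∀ tail : List Int,
          PySem.List.pySetD (pre ++ tail) (3 * (k : Int) + i) v
            = pre ++ PySem.List.pySetD tail i v := by
        intro i v hi tail
        rw [PySem.List.pySetD_of_nonneg _ _ (show (0:Int) ≤ 3 * (k : Int) + i by omega),
          PySem.List.pySetD_of_nonneg _ _ hi,
          List.set_append_right _ _ (by rw [hlen]; omega)]
        have hidx : (3 * (k : Int) + i).toNat - pre.length = i.toNat := by rw [hlen]; omega
        rw [hidx]
      rw [hrep]
      rw [hset 2 _ (by omega), hset 1 _ (by omega),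
        show (3 * (k : Int)) = 3 * (k : Int) + 0 from by ring, hset 0 _ (by omega)]
      refine Prod.ext ?_ ?_
      · simp [PySem.List.pySetD_of_nonneg]
      · simp only
        rw [PySem.Int.mod_eq_emod_of_pos hnpl, PySem.Int.floordiv_eq_ediv_of_pos hnpl,
          PySem.Int.floordiv_eq_ediv_of_pos hnpl, ediv_succ_step _ _ hnpl]

-- flatMap of a function constant on the list is the flattened replication of the block
theorem flatMap_const_eq_flatten_replicate {α : Type} (xs : List Int) (f : Int → List α)
    (t : List α) (h : ∀ x ∈ xs, f x = t) :
    xs.flatMap f = (List.replicate xs.length t).flatten := by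
  induction xs with
  | nil => rfl
  | cons x xs ih =>
      rw [List.flatMap_cons, h x List.mem_cons_self,
        ih (fun y hy => h y (List.mem_cons_of_mem _ hy)), List.length_cons,
        List.replicate_succ, List.flatten_cons]

-- bridge: the per-node flattened form (A's loop result) regrouped per layer is B's loop result
theorem per_node_eq_per_layer (dp lot npl : Int) (hnpl : 0 < npl) (L : Nat) :
    (PySem.List.pyRange 0 ((L : Int) * npl) 1).flatMap
      (fun n =>
        [lot - 1,
         (PySem.Int.floordiv n npl) * npl + dp - 1,
         (PySem.Int.floordiv n npl) * npl + dp - 1])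
    = (PySem.List.pyRange 0 (L : Int) 1).flatMap
        (fun l => PySem.List.pyRepeat [lot - 1, l * npl + dp - 1, l * npl + dp - 1] npl) := by
  induction L with
  | zero => simp [PySem.List.pyRange_one_eq_nil]
  | succ L ih =>
      have hcast : ((L + 1 : Nat) : Int) = (L : Int) + 1 := by push_cast; ring
      have hsplit : PySem.List.pyRange 0 (((L + 1 : Nat) : Int) * npl) 1
          = PySem.List.pyRange 0 ((L : Int) * npl) 1
            ++ PySem.List.pyRange ((L : Int) * npl) (((L + 1 : Nat) : Int) * npl) 1 := by
        refine PySem.List.pyRange_one_append _ _ _ (by positivity) ?_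
        rw [hcast]; nlinarith
      rw [hsplit, List.flatMap_append, ih, hcast,
          PySem.List.pyRange_one_succ_right (by positivity), List.flatMap_append]
      congr 1
      -- every node n of the chunk [L*npl, (L+1)*npl) has floor quotient L,
      -- so the chunk's flatMap is the block replicated npl times
      have hconst : ∀ n ∈ PySem.List.pyRange ((L : Int) * npl) (((L : Int) + 1) * npl) 1,
          ([lot - 1,
            (PySem.Int.floordiv n npl) * npl + dp - 1,
            (PySem.Int.floordiv n npl) * npl + dp - 1] : List Int)
          = [lot - 1, (L : Int) * npl + dp - 1, (L : Int) * npl + dp - 1] := by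
        intro n hn
        rw [PySem.List.mem_pyRange_one] at hn
        have hdiv : PySem.Int.floordiv n npl = (L : Int) := by
          rw [PySem.Int.floordiv_eq_ediv_of_pos hnpl]
          have hrepr : n = (n - (L : Int) * npl) + (L : Int) * npl := by ring
          rw [hrepr, Int.add_mul_ediv_right _ _ (by omega),
            Int.ediv_eq_zero_of_lt (by omega) (by nlinarith)]
          ring
        rw [hdiv]
      have hlen : (PySem.List.pyRange ((L : Int) * npl) (((L : Int) + 1) * npl) 1).length
          = npl.toNat := by
        rw [PySem.List.length_pyRange_one]; congr 1; ring
      rw [flatMap_const_eq_flatten_replicate _ _ _ hconst, hlen, List.flatMap_singleton]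
      simp [PySem.List.pyRepeat]

-- ===== VERDICT (by name: the statement is the Claim_ definition above) =====
theorem get_gene_max_values_spec : Claim_equal_get_gene_max_values := by
  intro dims nr_of_parameters len_of_op_table nr_of_nodes nodes_per_layer _ hpre
  obtain ⟨hnpl, hnn, hdims, hnp, hdvd, hlot⟩ := hpre
  unfold Spec_get_gene_max_values get_gene_max_values get_gene_max_values_alt
  simp only
  set N := nr_of_nodes.toNat with hN
  have hcast : nr_of_nodes = (N : Int) := by omega
  have hrepeat : PySem.List.pyRepeat ([-1] : List Int) (nr_of_nodes * 3 + 1)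
      = List.replicate (3 * N + 1) (-1) := by
    rw [PySem.List.pyRepeat_singleton]
    congr 1
    omega
  -- number of layers L, with nr_of_nodes = L * npl
  have hdvd' : nodes_per_layer ∣ nr_of_nodes := Int.dvd_of_emod_eq_zero hdvd
  obtain ⟨Lz, hLz⟩ := hdvd'
  have hLpos : 0 ≤ Lz := by nlinarith
  set L := Lz.toNat with hL
  have hLcast : Lz = (L : Int) := by omega
  have hNL : nr_of_nodes = (L : Int) * nodes_per_layer := by rw [hLz, hLcast]; ring
  have hfd : PySem.Int.floordiv nr_of_nodes nodes_per_layer = (L : Int) := by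
    rw [PySem.Int.floordiv_eq_ediv_of_pos hnpl, hNL,
      Int.mul_ediv_cancel _ (by omega)]
  rw [hcast] at hfd
  rw [hrepeat, hcast, loop_invariant _ _ _ hnpl N N le_rfl]
  simp only [Nat.sub_self]
  have hone : List.replicate (3 * 0 + 1) (-1 : Int) = [-1] := rfl
  rw [hone, pySetD_neg_one_append_singleton, hfd,
    PySem.List.foldl_append_eq_flatMap, List.nil_append]
  congr 1
  rw [← hcast, hNL]
  exact per_node_eq_per_layer _ _ _ hnpl L
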